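-- pv_equiv track=rewrite | github.com/brayandm/Crypto-Trading-Bot | app.py | round_number
-- ===== SOURCE A (Python) =====
-- def round_number(number, precision):
--
--     cad = str(number)
--
--     point_position = -1
--
--     for i in range(len(cad)):
--
--         if cad[i] == '.':
--
--             point_position = i
--
--     if point_position == -1:
--
--         return cad
--
--     while point_position + precision + 1 < len(cad):
--
--         cad = cad[0:-1]
--
--     while len(cad) < point_position + precision + 1:
--
--         cad += '0'
--
--     return cad
-- ===== SOURCE B (Python) =====
-- def round_number(number, precision):
--     cad = str(number)
--     point_position = cad.rfind('.')
--     if point_position == -1: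
--         return cad
--     t = point_position + precision + 1
--     return cad[:t].ljust(t, '0')
-- ===== Notes on version B (the rewrite author's own statement) =====
-- stated objective: simpler
-- what changed: Replaces A's index loop for the last '.' and its two per-character while loops (truncate one char at a time, pad one char at a time) by rfind plus a single computed slice cad[:t] and one ljust zero-pad (constant-factor speedup from avoiding per-character string rebuilding).
import Mathlib
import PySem

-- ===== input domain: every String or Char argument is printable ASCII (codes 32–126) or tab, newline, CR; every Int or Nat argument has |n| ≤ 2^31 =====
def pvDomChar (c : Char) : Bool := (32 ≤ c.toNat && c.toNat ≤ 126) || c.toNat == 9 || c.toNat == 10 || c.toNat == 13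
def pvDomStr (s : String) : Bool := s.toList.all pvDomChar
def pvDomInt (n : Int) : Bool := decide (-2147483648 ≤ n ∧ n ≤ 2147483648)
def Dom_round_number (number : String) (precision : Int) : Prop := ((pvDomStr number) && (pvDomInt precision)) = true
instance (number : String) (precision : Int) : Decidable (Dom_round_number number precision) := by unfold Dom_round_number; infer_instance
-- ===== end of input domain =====

-- B replaces A's last-'.' index loop and its two per-character while loops by rfind
-- plus one computed slice and one zero-pad (objective: simpler).


-- ===== PORT A =====
-- while point_position + precision + 1 < len(cad): cad = cad[0:-1]
-- (fuel = initial length; inside Pre_ the target is ≥ 0, so that fuel always suffices)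
def pvTruncA (target : Int) : Nat → List Char → List Char
  | 0, cad => cad
  | fuel + 1, cad =>
      if target < (cad.length : Int) then
        pvTruncA target fuel (PySem.List.slice cad (some 0) (some (-1)))
      else cad

-- while len(cad) < point_position + precision + 1: cad += '0'
def pvPadA (target : Int) (cad : List Char) : List Char :=
  if _h : (cad.length : Int) < target then pvPadA target (cad ++ ['0'])
  else cad
termination_by (target - cad.length).toNat
decreasing_by simp only [List.length_append, List.length_cons, List.length_nil]; omega

def round_number (number : String) (precision : Int) : String :=
  let cad := number.toList
  -- for i in range(len(cad)): if cad[i] == '.': point_position = i   (i always in range, so cad[i] = pyGetD)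
  let point_position : Int :=
    (PySem.List.pyRange 0 cad.length 1).foldl
      (fun p i => if PySem.List.pyGetD cad i ' ' = '.' then i else p) (-1)
  if point_position = -1 then String.ofList cad
  else
    let target := point_position + precision + 1
    String.ofList (pvPadA target (pvTruncA target cad.length cad))

-- ===== PORT B =====
def round_number_alt (number : String) (precision : Int) : String :=
  let cad := number.toList
  let point_position := PySem.Str.rfind number "."
  if point_position = -1 then String.ofList cad
  else
    let t := point_position + precision + 1
    let s := PySem.List.slice cad none (some t)
    -- s.ljust(t, '0'): pad on the right with '0' up to length t (exact: no-op when t ≤ len(s))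
    String.ofList (s ++ List.replicate (t.toNat - s.length) '0')

-- ===== PRECONDITION & SPEC =====
-- Pre_ excludes exactly the inputs where A never returns: a '.' present but
-- point_position + precision + 1 < 0 makes A's first while loop spin forever on the emptied string.
def Pre_round_number (number : String) (precision : Int) : Prop :=
  PySem.Str.rfind number "." = -1 ∨ 0 ≤ PySem.Str.rfind number "." + precision + 1
instance (number : String) (precision : Int) : Decidable (Pre_round_number number precision) := by
  unfold Pre_round_number; infer_instance
def pvWitness_round_number : String × Int := ("3.14159", 2)
def Spec_round_number (number : String) (precision : Int) (out : String) : Prop := out = round_number_alt number precision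
instance (number : String) (precision : Int) (out : String) : Decidable (Spec_round_number number precision out) := by unfold Spec_round_number; infer_instance

-- ===== CLAIM (what is proved, stated in full; the proofs are below) =====
def Claim_equal_round_number : Prop := ∀ (number : String) (precision : Int), Dom_round_number number precision → Pre_round_number number precision → Spec_round_number number precision (round_number number precision)

-- ===== LEMMAS AND PROOFS =====

-- [a].isPrefixOf (s.drop i) says exactly "s[i]? = some a"
theorem pvPrefix_drop_iff (s : List Char) (i : Nat) (a : Char) :
    ([a].isPrefixOf (s.drop i) = true) ↔ s[i]? = some a := by
  rw [← List.head?_drop, List.isPrefixOf_iff_prefix]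
  cases hd : s.drop i with
  | nil => simp
  | cons c t => simp [List.cons_prefix_cons, eq_comm]

theorem pvGo_succ (s : List Char) (j : Nat) :
    PySem.Chars.rfind.go s ['.'] (j + 1)
      = if ['.'].isPrefixOf (s.drop (j + 1)) = true then ((j : Int) + 1) else PySem.Chars.rfind.go s ['.'] j := by
  simp [PySem.Chars.rfind.go]

theorem pvGo_zero (s : List Char) :
    PySem.Chars.rfind.go s ['.'] 0 = if ['.'].isPrefixOf s = true then 0 else -1 := by
  simp [PySem.Chars.rfind.go]

-- the loop body of A's for-loop, rephrased through isPrefixOf (index j is a Nat cast)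
theorem pvBody (s : List Char) (j : Nat) (p : Int) :
    (if PySem.List.pyGetD s ((j : Nat) : Int) ' ' = '.' then ((j : Nat) : Int) else p)
      = if ['.'].isPrefixOf (s.drop j) = true then ((j : Nat) : Int) else p := by
  rw [PySem.List.pyGetD_natCast]
  by_cases h : s[j]? = some '.'
  · rw [if_pos (by simp [List.getD, h]), if_pos ((pvPrefix_drop_iff s j '.').mpr h)]
  · rw [if_neg, if_neg (by rw [pvPrefix_drop_iff]; exact h)]
    simp only [List.getD]
    cases hh : s[j]? with
    | none => decide
    | some c => simp_all

-- A's for-loop over range(len) computes rfind.go: checked up to index n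
theorem pvFoldl_eq_go (s : List Char) (n : Nat) :
    (PySem.List.pyRange 0 ((n : Int) + 1) 1).foldl
      (fun p i => if PySem.List.pyGetD s i ' ' = '.' then i else p) (-1)
      = PySem.Chars.rfind.go s ['.'] n := by
  induction n with
  | zero =>
      rw [PySem.List.pyRange_one_succ_right (a := 0) (b := ((0 : Nat) : Int)) (by norm_num)]
      have h0 : PySem.List.pyRange 0 ((0 : Nat) : Int) 1 = [] :=
        PySem.List.pyRange_one_eq_nil (by norm_num)
      rw [h0]
      simp only [List.nil_append, List.foldl_cons, List.foldl_nil]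
      rw [pvBody s 0, pvGo_zero]
      simp
  | succ k ih =>
      rw [PySem.List.pyRange_one_succ_right (a := 0) (b := ((k + 1 : Nat) : Int)) (by positivity)]
      rw [List.foldl_append]
      have hc : ((k + 1 : Nat) : Int) = (k : Int) + 1 := by push_cast; ring
      rw [hc, ih]
      simp only [List.foldl_cons, List.foldl_nil]
      rw [← hc, pvBody s (k + 1), pvGo_succ, hc]

-- A's loop equals rfind itself
theorem pvFoldl_eq_rfind (s : List Char) :
    (PySem.List.pyRange 0 (s.length : Int) 1).foldl
      (fun p i => if PySem.List.pyGetD s i ' ' = '.' then i else p) (-1)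
      = PySem.Chars.rfind s ['.'] := by
  show _ = PySem.Chars.rfind.go s ['.'] s.length
  cases hn : s.length with
  | zero =>
      have hnil : s = [] := List.length_eq_zero_iff.mp hn
      subst hnil
      simp [PySem.List.pyRange_one_eq_nil (le_refl (0 : Int)), pvGo_zero, List.isPrefixOf]
  | succ m =>
      rw [show ((m + 1 : Nat) : Int) = (m : Int) + 1 by push_cast; ring, pvFoldl_eq_go, pvGo_succ]
      have : ¬ ([ '.' ].isPrefixOf (s.drop (m + 1)) = true) := by
        rw [pvPrefix_drop_iff, List.getElem?_eq_none (by omega)]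
        simp
      simp [this]

theorem pvGo_neg_one_or_nonneg (s : List Char) (n : Nat) :
    PySem.Chars.rfind.go s ['.'] n = -1 ∨ 0 ≤ PySem.Chars.rfind.go s ['.'] n := by
  induction n with
  | zero =>
      rw [pvGo_zero]
      split_ifs <;> simp
  | succ k ih =>
      rw [pvGo_succ]
      split_ifs with h
      · right; positivity
      · exact ih

theorem pvTruncA_eq_take (target : Int) (ht : 0 ≤ target) :
    ∀ (fuel : Nat) (cad : List Char), cad.length ≤ fuel →
      pvTruncA target fuel cad = cad.take target.toNat := by
  intro fuel
  induction fuel with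
  | zero =>
      intro cad hlen
      have : cad = [] := List.length_eq_zero_iff.mp (by omega)
      subst this; simp [pvTruncA]
  | succ f ih =>
      intro cad hlen
      rw [pvTruncA]
      split_ifs with h
      · rw [PySem.List.slice_zero_start, PySem.List.slice_to_neg_one]
        rw [ih _ (by simp [List.length_dropLast]; omega)]
        rw [List.dropLast_eq_take, List.take_take]
        congr 1; omega
      · rw [List.take_of_length_le (by omega)]

theorem pvPadA_eq_append (target : Int) (ht : 0 ≤ target) :
    ∀ (fuel : Nat) (cad : List Char), target.toNat - cad.length ≤ fuel →
      pvPadA target cad = cad ++ List.replicate (target.toNat - cad.length) '0' := by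
  intro fuel
  induction fuel with
  | zero =>
      intro cad hlen
      rw [pvPadA]
      have hle : ¬ ((cad.length : Int) < target) := by omega
      simp [hle]; omega
  | succ f ih =>
      intro cad hlen
      rw [pvPadA]
      split_ifs with h
      · rw [ih (cad ++ ['0']) (by simp; omega)]
        have hgt : cad.length < target.toNat := by omega
        rw [List.append_assoc]
        congr 1
        have h1 : target.toNat - cad.length = (target.toNat - (cad ++ ['0']).length) + 1 := by
          simp; omega
        rw [h1, List.replicate_succ]
        simp
      · have : target.toNat - cad.length = 0 := by omega
        simp [this]

-- ===== VERDICT (by name: the statement is the Claim_ definition above) =====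
theorem round_number_spec : Claim_equal_round_number := by
  intro number precision _hdom hpre
  unfold Spec_round_number round_number round_number_alt
  simp only []
  rw [pvFoldl_eq_rfind number.toList]
  have hbridge : PySem.Str.rfind number "." = PySem.Chars.rfind number.toList ['.'] := by
    rw [PySem.Str.rfind_eq]; rfl
  unfold Pre_round_number at hpre
  rw [hbridge] at hpre
  rw [hbridge]
  by_cases h : PySem.Chars.rfind number.toList ['.'] = -1
  · rw [if_pos h, if_pos h]
  · rw [if_neg h, if_neg h]
    have hp0 : 0 ≤ PySem.Chars.rfind number.toList ['.'] := by
      rcases pvGo_neg_one_or_nonneg number.toList number.toList.length with h1 | h2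
      · exact absurd h1 h
      · exact h2
    have ht : 0 ≤ PySem.Chars.rfind number.toList ['.'] + precision + 1 := by
      rcases hpre with h1 | h2
      · exact absurd h1 h
      · exact h2
    set t := PySem.Chars.rfind number.toList ['.'] + precision + 1 with hT
    have h1 : pvPadA t (pvTruncA t number.toList.length number.toList)
        = (PySem.List.slice number.toList none (some t)) ++
          List.replicate (t.toNat - (PySem.List.slice number.toList none (some t)).length) '0' := by
      rw [PySem.List.slice_to number.toList ht,
        pvTruncA_eq_take t ht number.toList.length number.toList (le_refl _),
        pvPadA_eq_append t ht t.toNat (number.toList.take t.toNat)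
          (by simp only [List.length_take]; omega)]
    rw [h1]
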